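-- pv_equiv track=rewrite | github.com/MeenaVasanth/SmartCareer | recommender.py | create_learning_path
-- ===== SOURCE A (Python) =====
-- def create_learning_path(recommendations):
--     """Create structured learning path from recommendations"""
--     short_term = [r for r in recommendations if r['timeline'] == 'short-term']
--     medium_term = [r for r in recommendations if r['timeline'] == 'medium-term']
--     long_term = [r for r in recommendations if r['timeline'] == 'long-term']
--
--     return {
--         'short_term_plan': short_term[:3],  # Next 1-3 months
--         'medium_term_plan': medium_term[:2],  # Next 3-6 months
--         'long_term_plan': long_term[:2]  # Next 6-12 months
--     }
-- ===== SOURCE B (Python) =====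
-- def create_learning_path(recommendations):
--     """Create structured learning path from recommendations"""
--     groups = {}
--     for r in recommendations:
--         groups.setdefault(r['timeline'], []).append(r)
--     return {
--         'short_term_plan': groups.get('short-term', [])[:3],  # Next 1-3 months
--         'medium_term_plan': groups.get('medium-term', [])[:2],  # Next 3-6 months
--         'long_term_plan': groups.get('long-term', [])[:2]  # Next 6-12 months
--     }
-- ===== Notes on version B (the rewrite author's own statement) =====
-- stated objective: alternative
-- what changed: Replaces three separate filtering scans of the recommendation list with a single grouping pass that buckets items by their 'timeline' value in a dict, then slices each bucket (3/2/2) with empty defaults.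
import Mathlib
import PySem

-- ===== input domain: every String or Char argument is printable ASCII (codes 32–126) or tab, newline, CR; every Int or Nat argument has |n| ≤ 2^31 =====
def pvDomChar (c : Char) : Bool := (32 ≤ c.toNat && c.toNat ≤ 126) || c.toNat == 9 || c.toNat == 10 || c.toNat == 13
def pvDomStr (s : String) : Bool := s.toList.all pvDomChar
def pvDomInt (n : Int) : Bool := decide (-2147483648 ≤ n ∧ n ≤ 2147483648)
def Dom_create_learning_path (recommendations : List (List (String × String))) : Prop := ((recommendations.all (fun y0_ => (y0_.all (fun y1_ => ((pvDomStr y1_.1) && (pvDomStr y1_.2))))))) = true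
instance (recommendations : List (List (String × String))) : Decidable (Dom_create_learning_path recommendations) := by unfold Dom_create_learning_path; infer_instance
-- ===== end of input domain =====

-- B replaces A's three filtering scans with a single grouping pass over the list plus sliced lookups (alternative decomposition, same cost class).


-- ===== PORT A =====
-- r['timeline'] (first-match lookup in the association list); none = the key is absent (Python KeyError, excluded by Pre_)
def pvTimelineA (r : List (String × String)) : Option String :=
  (r.find? (fun p => p.1 == "timeline")).map (·.2)

def create_learning_path (recommendations : List (List (String × String))) : List (String × List (List (String × String))) :=
  let short_term := recommendations.filter (fun r => pvTimelineA r == some "short-term")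
  let medium_term := recommendations.filter (fun r => pvTimelineA r == some "medium-term")
  let long_term := recommendations.filter (fun r => pvTimelineA r == some "long-term")
  [("short_term_plan", short_term.take 3),
   ("medium_term_plan", medium_term.take 2),
   ("long_term_plan", long_term.take 2)]

-- ===== PORT B =====
-- the inline (r.find? …).map (·.2) is r['timeline']: same first-match lookup; Pre_ guarantees the key is present
def create_learning_path_alt (recommendations : List (List (String × String))) : List (String × List (List (String × String))) :=
  let groups : PySem.Dict (Option String) (List (List (String × String))) :=
    recommendations.foldl (fun d r => d.modify ((r.find? (fun p => p.1 == "timeline")).map (·.2)) [] (· ++ [r])) PySem.Dict.empty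
  [("short_term_plan", (groups.getD (some "short-term") []).take 3),
   ("medium_term_plan", (groups.getD (some "medium-term") []).take 2),
   ("long_term_plan", (groups.getD (some "long-term") []).take 2)]

-- ===== PRECONDITION & SPEC =====
-- Pre_ excludes inputs where some recommendation lacks a 'timeline' key: both Pythons raise KeyError there.
def Pre_create_learning_path (recommendations : List (List (String × String))) : Prop :=
  (recommendations.all (fun r => r.any (fun p => p.1 == "timeline"))) = true
instance (recommendations : List (List (String × String))) : Decidable (Pre_create_learning_path recommendations) := by unfold Pre_create_learning_path; infer_instance

def pvWitness_create_learning_path : (List (List (String × String))) :=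
  [[("timeline", "short-term"), ("skill", "sql")], [("timeline", "long-term")]]

def Spec_create_learning_path (recommendations : List (List (String × String))) (out : List (String × List (List (String × String)))) : Prop := out = create_learning_path_alt recommendations
instance (recommendations : List (List (String × String))) (out : List (String × List (List (String × String)))) : Decidable (Spec_create_learning_path recommendations out) := by unfold Spec_create_learning_path; infer_instance

-- ===== CLAIM (what is proved, stated in full; the proofs are below) =====
def Claim_equal_create_learning_path : Prop := ∀ (recommendations : List (List (String × String))), Dom_create_learning_path recommendations → Pre_create_learning_path recommendations → Spec_create_learning_path recommendations (create_learning_path recommendations)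

-- ===== LEMMAS AND PROOFS =====
-- the grouping dict's bucket at key k is exactly A's filter by timeline k
theorem pv_group_eq_filter (recommendations : List (List (String × String))) (k : Option String) :
    (recommendations.foldl (fun d r => d.modify ((r.find? (fun p => p.1 == "timeline")).map (·.2)) [] (· ++ [r])) PySem.Dict.empty).getD k []
      = recommendations.filter (fun r => pvTimelineA r == k) := by
  have h : recommendations.foldl (fun d r => d.modify ((r.find? (fun p => p.1 == "timeline")).map (·.2)) [] (· ++ [r])) PySem.Dict.empty
      = (recommendations.map (fun r => ((r.find? (fun p => p.1 == "timeline")).map (·.2), r))).foldl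
          (fun d p => d.modify p.1 [] (· ++ [p.2])) PySem.Dict.empty := by
    rw [List.foldl_map]
  rw [h, PySem.Dict.getD_foldl_modify_append]
  simp [List.filter_map, Function.comp_def, pvTimelineA]

-- ===== VERDICT (by name: the statement is the Claim_ definition above) =====
theorem create_learning_path_spec : Claim_equal_create_learning_path := by
  intro recs _ _
  unfold Spec_create_learning_path create_learning_path create_learning_path_alt
  simp only [pv_group_eq_filter]
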